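-- pv_equiv track=rewrite | github.com/nermadie/CodeForces_Solutions | CodeforcesRound964Div4/prob02.py | solve
-- ===== SOURCE A (Python) =====
-- def solve(a1, a2, b1, b2):
--     a = [a1, a2]
--     b = [b1, b2]
--     result = 0
--     for i in range(2):
--         for j in range(2):
--             if a[i] > b[j] and not a[(i + 1) % 2] < b[(j + 1) % 2]:
--                 result += 1
--             if a[i] == b[j] and a[(i + 1) % 2] > b[(j + 1) % 2]:
--                 result += 1
--     return result
-- ===== SOURCE B (Python) =====
-- def solve(a1, a2, b1, b2):
--     # The four enumerated games come in identical pairs (swapping the order of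
--     # Suneet's two cards just swaps round 1 and round 2), so evaluate only the
--     # two distinct matchups of the sorted hands and double the count.
--     hi_a, lo_a = max(a1, a2), min(a1, a2)
--     hi_b, lo_b = max(b1, b2), min(b1, b2)
--
--     def beats(x, p, y, q):
--         return (x > p) + (y > q) > (x < p) + (y < q)
--
--     return 2 * (beats(hi_a, hi_b, lo_a, lo_b) + beats(hi_a, lo_b, lo_a, hi_b))
-- ===== Notes on version B (the rewrite author's own statement) =====
-- stated objective: simpler
-- what changed: Instead of enumerating all four card orderings with modular companion indexing and two hand-written win conditions, B sorts each hand, evaluates only the two distinct matchups (hi-vs-hi/lo-vs-lo and hi-vs-lo/lo-vs-hi) with a round-score comparison, and doubles the count using the symmetry that swapping Suneet's card order only permutes the rounds.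
import Mathlib
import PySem

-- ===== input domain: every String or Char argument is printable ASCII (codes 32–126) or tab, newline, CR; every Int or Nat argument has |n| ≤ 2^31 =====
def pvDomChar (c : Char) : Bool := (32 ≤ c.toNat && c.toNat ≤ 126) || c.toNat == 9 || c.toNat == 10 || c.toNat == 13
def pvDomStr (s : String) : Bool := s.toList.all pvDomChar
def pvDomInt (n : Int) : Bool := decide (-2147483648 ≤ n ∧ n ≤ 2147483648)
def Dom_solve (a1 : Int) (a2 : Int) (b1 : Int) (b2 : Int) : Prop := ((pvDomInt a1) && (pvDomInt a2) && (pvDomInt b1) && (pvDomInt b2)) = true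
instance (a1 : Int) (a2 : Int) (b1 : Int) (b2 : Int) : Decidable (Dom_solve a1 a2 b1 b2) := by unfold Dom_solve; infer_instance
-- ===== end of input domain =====

-- B sorts each hand, evaluates only the two distinct matchups and doubles the count
-- by the swap symmetry of Suneet's card order (objective: simpler).

-- ===== PORT A =====
def solve (a1 : Int) (a2 : Int) (b1 : Int) (b2 : Int) : Int :=
  let a := [a1, a2]
  let b := [b1, b2]
  (PySem.List.pyRange 0 2 1).foldl (fun result i =>
    (PySem.List.pyRange 0 2 1).foldl (fun result j =>
      let result :=
        if PySem.List.pyGetD a i 0 > PySem.List.pyGetD b j 0 ∧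
           ¬ (PySem.List.pyGetD a (PySem.Int.mod (i + 1) 2) 0 < PySem.List.pyGetD b (PySem.Int.mod (j + 1) 2) 0)
        then result + 1 else result
      if PySem.List.pyGetD a i 0 = PySem.List.pyGetD b j 0 ∧
         PySem.List.pyGetD a (PySem.Int.mod (i + 1) 2) 0 > PySem.List.pyGetD b (PySem.Int.mod (j + 1) 2) 0
      then result + 1 else result) result) 0

-- ===== PORT B =====
def solveAltBeats (x p y q : Int) : Bool :=
  ((if x > p then (1:Int) else 0) + (if y > q then (1:Int) else 0))
    > ((if x < p then (1:Int) else 0) + (if y < q then (1:Int) else 0))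

def solve_alt (a1 : Int) (a2 : Int) (b1 : Int) (b2 : Int) : Int :=
  let hiA := max a1 a2
  let loA := min a1 a2
  let hiB := max b1 b2
  let loB := min b1 b2
  2 * ((if solveAltBeats hiA hiB loA loB then (1:Int) else 0) +
       (if solveAltBeats hiA loB loA hiB then (1:Int) else 0))

-- ===== PRECONDITION & SPEC =====
def Spec_solve (a1 : Int) (a2 : Int) (b1 : Int) (b2 : Int) (out : Int) : Prop := out = solve_alt a1 a2 b1 b2
instance (a1 : Int) (a2 : Int) (b1 : Int) (b2 : Int) (out : Int) : Decidable (Spec_solve a1 a2 b1 b2 out) := by unfold Spec_solve; infer_instance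

-- ===== CLAIM (what is proved, stated in full; the proofs are below) =====
def Claim_equal_solve : Prop := ∀ (a1 : Int) (a2 : Int) (b1 : Int) (b2 : Int), Dom_solve a1 a2 b1 b2 → Spec_solve a1 a2 b1 b2 (solve a1 a2 b1 b2)

-- ===== LEMMAS AND PROOFS =====
theorem step (x p y q t : Int) :
    (if x = p ∧ y > q then (if x > p ∧ ¬ y < q then t + 1 else t) + 1
     else if x > p ∧ ¬ y < q then t + 1 else t)
    = t + (if solveAltBeats x p y q then (1:Int) else 0) := by
  simp only [solveAltBeats, decide_eq_true_eq]
  split_ifs <;> omega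

theorem game_swap (x p y q : Int) :
    (if solveAltBeats x p y q then (1:Int) else 0)
      = (if solveAltBeats y q x p then (1:Int) else 0) := by
  unfold solveAltBeats
  rw [add_comm (if x > p then (1:Int) else 0), add_comm (if x < p then (1:Int) else 0)]

theorem pyRange_02 : PySem.List.pyRange 0 2 1 = [0, 1] := by decide

theorem mod01 : PySem.Int.mod ((0 : Int) + 1) 2 = 1 := by decide
theorem mod10 : PySem.Int.mod ((1 : Int) + 1) 2 = 0 := by decide

theorem getD0 (x y : Int) : PySem.List.pyGetD [x, y] 0 0 = x := by
  simp [PySem.List.pyGetD, PySem.List.pyGet?, PySem.List.pyIdx?]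

theorem getD1 (x y : Int) : PySem.List.pyGetD [x, y] 1 0 = y := by
  simp [PySem.List.pyGetD, PySem.List.pyGet?, PySem.List.pyIdx?]

-- ===== VERDICT (by name: the statement is the Claim_ definition above) =====
theorem solve_spec : Claim_equal_solve := by
  intro a1 a2 b1 b2 _
  unfold Spec_solve solve solve_alt
  rw [pyRange_02]
  simp only [List.foldl, mod01, mod10, getD0, getD1, step]
  rcases le_total a1 a2 with ha | ha <;> rcases le_total b1 b2 with hb | hb
  · rw [max_eq_right ha, min_eq_left ha, max_eq_right hb, min_eq_left hb,
        game_swap a2 b1 a1 b2, game_swap a2 b2 a1 b1]; ring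
  · rw [max_eq_right ha, min_eq_left ha, max_eq_left hb, min_eq_right hb,
        game_swap a2 b1 a1 b2, game_swap a2 b2 a1 b1]; ring
  · rw [max_eq_left ha, min_eq_right ha, max_eq_right hb, min_eq_left hb,
        game_swap a2 b1 a1 b2, game_swap a2 b2 a1 b1]; ring
  · rw [max_eq_left ha, min_eq_right ha, max_eq_left hb, min_eq_right hb,
        game_swap a2 b1 a1 b2, game_swap a2 b2 a1 b1]; ring
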